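-- pv_equiv track=rewrite | github.com/cocotools/CoCoTools | deduce_rcs.py | no_tpath_dups
-- ===== SOURCE A (Python) =====
-- def no_tpath_dups(tpath):
--     """Return True if no regions with same map in tpath, False otherwise.
--
--     Parameters
--     ----------
--     tpath : list
--       Chain of regions each with a known relation to the region in front of and
--       behind it in the list.
--
--     Returns
--     -------
--     True or False : boolean
--       Indicates whether every region in the tpath is from a unique map.
--     """
--     map_list = []
--
--     for region in tpath:
--         map_list.append(region.split('-')[0])
--
--     for map in map_list:
--         if map_list.count(map) > 1:
--             break
--
--     else:
--         return True
--
--     return False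
-- ===== SOURCE B (Python) =====
-- def no_tpath_dups(tpath):
--     prefixes = [region.split('-')[0] for region in tpath]
--     ordered = sorted(prefixes)
--     for prev, cur in zip(ordered, ordered[1:]):
--         if prev == cur:
--             return False
--     return True
-- ===== Notes on version B (the rewrite author's own statement) =====
-- stated objective: alternative
-- what changed: Replaces A's per-element list.count rescans (quadratic with early break) with sorting the prefix list once and a single adjacent-equality pass.
import Mathlib
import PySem

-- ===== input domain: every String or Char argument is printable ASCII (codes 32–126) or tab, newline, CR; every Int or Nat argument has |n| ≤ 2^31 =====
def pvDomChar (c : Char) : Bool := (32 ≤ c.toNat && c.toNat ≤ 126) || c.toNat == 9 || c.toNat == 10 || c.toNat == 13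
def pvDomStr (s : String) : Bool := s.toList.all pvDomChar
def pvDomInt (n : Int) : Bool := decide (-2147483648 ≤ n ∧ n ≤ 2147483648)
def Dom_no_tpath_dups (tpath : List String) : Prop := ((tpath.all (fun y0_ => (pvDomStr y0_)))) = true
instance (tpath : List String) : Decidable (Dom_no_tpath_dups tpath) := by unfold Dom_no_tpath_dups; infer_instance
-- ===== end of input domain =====

-- B checks prefix uniqueness by sorting the prefix list once and scanning adjacent pairs, instead of A's per-element .count rescans (alternative algorithm).

-- ===== PORT A =====
-- region.split('-')[0]: Python split with a nonempty separator always returns a nonempty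
-- list, so index 0 is exact and ported as headI.
def pvPrefixA (region : String) : String := ((PySem.Str.split? region "-").getD []).headI

-- 'for map in map_list: if map_list.count(map) > 1: break / else: return True' then 'return False'
def pvScanA (full : List String) : List String → Bool
  | [] => true
  | m :: rest => if PySem.List.count full m > 1 then false else pvScanA full rest

def no_tpath_dups (tpath : List String) : Bool :=
  let map_list := tpath.foldl (fun acc region => acc ++ [pvPrefixA region]) []
  pvScanA map_list map_list

-- ===== PORT B =====
-- the zip(ordered, ordered[1:]) loop with early return False
def pvAdjScanB : List String → Bool
  | [] => true
  | [_] => true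
  | prev :: cur :: rest => if prev == cur then false else pvAdjScanB (cur :: rest)

def no_tpath_dups_alt (tpath : List String) : Bool :=
  let prefixes := tpath.map (fun region => ((PySem.Str.split? region "-").getD []).headI)
  let ordered := PySem.List.sorted prefixes (fun x => x) false
  pvAdjScanB ordered

-- ===== PRECONDITION & SPEC =====
def Spec_no_tpath_dups (tpath : List String) (out : Bool) : Prop := out = no_tpath_dups_alt tpath
instance (tpath : List String) (out : Bool) : Decidable (Spec_no_tpath_dups tpath out) := by unfold Spec_no_tpath_dups; infer_instance

-- ===== CLAIM (what is proved, stated in full; the proofs are below) =====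
def Claim_equal_no_tpath_dups : Prop := ∀ (tpath : List String), Dom_no_tpath_dups tpath → Spec_no_tpath_dups tpath (no_tpath_dups tpath)

-- ===== LEMMAS AND PROOFS =====

theorem pvFoldlAppend_eq_map (f : String → String) (l : List String) (acc : List String) :
    l.foldl (fun a r => a ++ [f r]) acc = acc ++ l.map f := by
  induction l generalizing acc with
  | nil => simp
  | cons x xs ih => simp [List.foldl, ih]

theorem pvScanA_true_iff (full : List String) (l : List String) :
    pvScanA full l = true ↔ ∀ m ∈ l, full.count m ≤ 1 := by
  induction l with
  | nil => simp [pvScanA]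
  | cons m rest ih =>
    simp only [pvScanA, PySem.List.count_eq]
    by_cases h : List.count m full > 1
    · rw [if_pos h]
      constructor
      · intro hf; cases hf
      · intro hall; exact absurd (hall m (by simp)) (by omega)
    · rw [if_neg h, ih]
      constructor
      · intro hall x hx
        rcases List.mem_cons.mp hx with rfl | hx
        · omega
        · exact hall x hx
      · intro hall x hx; exact hall x (List.mem_cons_of_mem _ hx)

theorem pvA_true_iff_nodup (ml : List String) : pvScanA ml ml = true ↔ ml.Nodup := by
  rw [pvScanA_true_iff, List.nodup_iff_count_le_one]
  constructor
  · intro h a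
    by_cases ha : a ∈ ml
    · exact h a ha
    · simp [List.count_eq_zero_of_not_mem ha]
  · intro h a _; exact h a

theorem pvAdjScanB_true_iff_nodup (s : List String) (hs : s.Pairwise (· ≤ ·)) :
    pvAdjScanB s = true ↔ s.Nodup := by
  induction s with
  | nil => simp [pvAdjScanB]
  | cons a t ih =>
    cases t with
    | nil => simp [pvAdjScanB]
    | cons b rest =>
      rcases List.pairwise_cons.mp hs with ⟨hale, htail⟩
      have hab : a ≤ b := hale b (by simp)
      by_cases he : a = b
      · subst he
        simp only [pvAdjScanB, beq_self_eq_true, if_true]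
        constructor
        · intro hf; cases hf
        · intro hn; exact absurd rfl ((List.pairwise_cons.mp hn).1 a (by simp))
      · have hlt : a < b := lt_of_le_of_ne hab he
        have hne : (a == b) = false := beq_eq_false_iff_ne.mpr he
        simp only [pvAdjScanB, hne, Bool.false_eq_true, if_false]
        rw [ih htail]
        constructor
        · intro hn
          refine List.nodup_cons.mpr ⟨?_, hn⟩
          intro hmem
          have : b ≤ a := by
            rcases List.mem_cons.mp hmem with rfl | hx
            · exact le_refl a
            · exact ((List.pairwise_cons.mp htail).1 a hx)
          exact absurd (lt_of_lt_of_le hlt this) (lt_irrefl a)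
        · intro hn; exact (List.nodup_cons.mp hn).2

theorem pvB_true_iff_nodup (ml : List String) :
    pvAdjScanB (PySem.List.sorted ml (fun x => x) false) = true ↔ ml.Nodup := by
  have hperm := PySem.List.sorted_perm (xs := ml) (key := fun x => x) (rev := false)
  have hpw := PySem.List.sorted_pairwise (xs := ml) (key := fun x => x)
  rw [pvAdjScanB_true_iff_nodup _ hpw]
  exact hperm.nodup_iff

-- ===== VERDICT (by name: the statement is the Claim_ definition above) =====
theorem no_tpath_dups_spec : Claim_equal_no_tpath_dups := by
  intro tpath _
  unfold Spec_no_tpath_dups no_tpath_dups no_tpath_dups_alt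
  rw [pvFoldlAppend_eq_map, List.nil_append]
  rw [Bool.eq_iff_iff, pvA_true_iff_nodup, pvB_true_iff_nodup]
  rfl
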